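-- pv_equiv track=rewrite | github.com/863401402/she-love-me | scripts/extract_messages.py | find_username
-- ===== SOURCE A (Python) =====
-- def find_username(contact_query, names):
--     """模糊匹配联系人名字，返回 username"""
--     q = contact_query.strip().lower()
--     # 精确匹配 username
--     if contact_query in names:
--         return contact_query
--     # 精确匹配 display_name
--     for uname, display in names.items():
--         if q == display.lower():
--             return uname
--     # 模糊匹配
--     for uname, display in names.items():
--         if q in display.lower() or q in uname.lower():
--             return uname
--     return None
-- ===== SOURCE B (Python) =====
-- def find_username(contact_query, names):
--     """模糊匹配联系人名字，返回 username"""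
--     q = contact_query.strip().lower()
--     if contact_query in names:
--         return contact_query
--     exact = None
--     fuzzy = None
--     for uname, display in names.items():
--         d = display.lower()
--         if exact is None and q == d:
--             exact = uname
--         if fuzzy is None and (q in d or q in uname.lower()):
--             fuzzy = uname
--     if exact is not None:
--         return exact
--     return fuzzy
-- ===== Notes on version B (the rewrite author's own statement) =====
-- stated objective: alternative
-- what changed: Replaced A's two sequential scans over names.items() (exact-display pass, then fuzzy pass) with one single pass that records, on first occurrence only, an exact-display candidate and a fuzzy candidate, returning exact over fuzzy after the loop.
import Mathlib
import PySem

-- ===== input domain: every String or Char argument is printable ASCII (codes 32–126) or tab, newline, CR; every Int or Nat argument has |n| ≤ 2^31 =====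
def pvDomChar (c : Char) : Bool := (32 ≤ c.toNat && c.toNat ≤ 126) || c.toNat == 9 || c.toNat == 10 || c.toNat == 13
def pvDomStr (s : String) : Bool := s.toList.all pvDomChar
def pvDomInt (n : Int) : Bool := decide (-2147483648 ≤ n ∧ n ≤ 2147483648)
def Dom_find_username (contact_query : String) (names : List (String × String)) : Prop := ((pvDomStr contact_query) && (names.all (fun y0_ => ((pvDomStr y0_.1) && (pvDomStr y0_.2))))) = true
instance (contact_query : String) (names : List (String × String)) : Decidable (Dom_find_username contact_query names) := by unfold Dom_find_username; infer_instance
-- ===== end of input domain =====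

-- B merges A's two sequential scans into one pass with two first-occurrence candidates (alternative decomposition, same cost).
-- ===== PORT A =====
def find_username (contact_query : String) (names : List (String × String)) : Option String :=
  let q := PySem.Str.lower (PySem.Str.strip contact_query)
  if names.any (fun p => p.1 == contact_query) then some contact_query  -- `contact_query in names`: dict key membership
  else
    match names.findSome? (fun p => if q == PySem.Str.lower p.2 then some p.1 else none) with
    | some u => some u
    | none =>
      names.findSome? (fun p =>
        if PySem.Str.isIn q (PySem.Str.lower p.2) || PySem.Str.isIn q (PySem.Str.lower p.1)
        then some p.1 else none)

-- ===== PORT B =====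
def find_username_alt (contact_query : String) (names : List (String × String)) : Option String :=
  let q := PySem.Str.lower (PySem.Str.strip contact_query)
  if names.any (fun p => p.1 == contact_query) then some contact_query  -- `contact_query in names`: dict key membership
  else
    let r := names.foldl (fun (acc : Option String × Option String) p =>
      let d := PySem.Str.lower p.2
      let ex := if acc.1.isNone && (q == d) then some p.1 else acc.1
      let fz := if acc.2.isNone && (PySem.Str.isIn q d || PySem.Str.isIn q (PySem.Str.lower p.1))
                then some p.1 else acc.2
      (ex, fz)) (none, none)
    match r.1 with
    | some u => some u
    | none => r.2

-- ===== PRECONDITION & SPEC =====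
def Spec_find_username (contact_query : String) (names : List (String × String)) (out : Option String) : Prop := out = find_username_alt contact_query names
instance (contact_query : String) (names : List (String × String)) (out : Option String) : Decidable (Spec_find_username contact_query names out) := by unfold Spec_find_username; infer_instance

-- ===== CLAIM (what is proved, stated in full; the proofs are below) =====
def Claim_equal_find_username : Prop := ∀ (contact_query : String) (names : List (String × String)), Dom_find_username contact_query names → Spec_find_username contact_query names (find_username contact_query names)

-- ===== LEMMAS AND PROOFS =====

-- ===== VERDICT (by name: the statement is the Claim_ definition above) =====
theorem fold_pair_first (q : String) (names : List (String × String))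
    (e f : Option String) :
    names.foldl (fun (acc : Option String × Option String) p =>
      let d := PySem.Str.lower p.2
      let ex := if acc.1.isNone && (q == d) then some p.1 else acc.1
      let fz := if acc.2.isNone && (PySem.Str.isIn q d || PySem.Str.isIn q (PySem.Str.lower p.1))
                then some p.1 else acc.2
      (ex, fz)) (e, f)
    = (e.orElse (fun _ => names.findSome? (fun p => if q == PySem.Str.lower p.2 then some p.1 else none)),
       f.orElse (fun _ => names.findSome? (fun p =>
         if PySem.Str.isIn q (PySem.Str.lower p.2) || PySem.Str.isIn q (PySem.Str.lower p.1)
         then some p.1 else none))) := by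
  induction names generalizing e f with
  | nil => cases e <;> cases f <;> simp [Option.orElse]
  | cons p ps ih =>
    simp only [List.foldl_cons, List.findSome?_cons]
    rw [ih]
    cases e <;> cases f <;>
      rcases hq : (q == PySem.Str.lower p.2) with _ | _ <;>
      rcases hf : (PySem.Str.isIn q (PySem.Str.lower p.2) || PySem.Str.isIn q (PySem.Str.lower p.1)) with _ | _ <;>
      simp [Option.orElse]

theorem find_username_spec : Claim_equal_find_username := by
  intro contact_query names _
  unfold Spec_find_username find_username find_username_alt
  simp only [fold_pair_first]
  split_ifs
  · rfl
  · cases names.findSome? (fun p => if (PySem.Str.lower (PySem.Str.strip contact_query)) == PySem.Str.lower p.2 then some p.1 else none) <;>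
      simp [Option.orElse]
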